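-- pv_equiv track=rewrite | github.com/ReneFabricius/project-euler | pr105.py | isValidSet
-- ===== SOURCE A (Python) =====
-- from itertools import combinations
--
-- def isValidSet(S):
--     l = len(S)
--     for cl in range(2, l//2 + 1):
--         for fc in combinations(S, cl):
--             for sc in combinations(S - set(fc), cl):
--                 if sum(fc) == sum (sc):
--                     return False
--
--     return True
-- ===== SOURCE B (Python) =====
-- from itertools import combinations
--
-- def isValidSet(S):
--     # Enumerate the subsets of each cardinality k once, remembering the sums seen
--     # in a hash set: two distinct equal-size subsets with equal sums reduce, by
--     # removing their intersection, to two disjoint equal-size equal-sum subsets,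
--     # so a sum collision within one cardinality decides the property without
--     # A's inner scan over all disjoint partner subsets.
--     elems = list(dict.fromkeys(S))
--     n = len(elems)
--     for k in range(1, n + 1):
--         seen = set()
--         for c in combinations(elems, k):
--             s = sum(c)
--             if s in seen:
--                 return False
--             seen.add(s)
--     return True
-- ===== Notes on version B (the rewrite author's own statement) =====
-- stated objective: faster
-- what changed: Instead of A's nested scan over all ordered pairs (fc, sc) of disjoint equal-size subsets, B enumerates each cardinality's subsets once and detects a duplicate subset-sum with a hash set, relying on the fact that two distinct equal-size equal-sum subsets reduce to disjoint ones by removing their intersection; this removes A's inner combinations scan entirely.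
import Mathlib
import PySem

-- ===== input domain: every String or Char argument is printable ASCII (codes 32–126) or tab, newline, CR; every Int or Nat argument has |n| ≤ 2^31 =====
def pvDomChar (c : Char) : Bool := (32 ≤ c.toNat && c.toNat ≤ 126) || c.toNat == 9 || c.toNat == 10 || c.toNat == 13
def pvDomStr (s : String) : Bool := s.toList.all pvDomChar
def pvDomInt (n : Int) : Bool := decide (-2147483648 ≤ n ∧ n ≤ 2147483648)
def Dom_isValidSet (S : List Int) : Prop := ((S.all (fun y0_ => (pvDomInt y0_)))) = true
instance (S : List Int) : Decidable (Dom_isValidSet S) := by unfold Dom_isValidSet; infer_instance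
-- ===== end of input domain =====

-- B replaces A's scan over all disjoint PAIRS of equal-size subsets by one enumeration
-- of each cardinality's subsets against a hash set of their sums (objective: faster).
-- S is a Python set (py_type set[int]); both ports decode the List Int argument with
-- PySem.Set.ofList (= set(S): distinct elements, first occurrences) before working on it.

-- ===== PORT A =====
-- itertools.combinations(xs, k) over a list of the set's elements (the result of A
-- does not depend on the set's iteration order, so the ofList order is used)
def pyCombinations (xs : List Int) : Nat → List (List Int)
  | 0 => [[]]
  | k + 1 =>
    match xs with
    | [] => []
    | x :: rest => (pyCombinations rest k).map (fun c => x :: c) ++ pyCombinations rest (k + 1)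

-- the three nested for-loops with 'return False' on a hit, then 'return True'
def isValidSet (S : List Int) : Bool :=
  let T := PySem.Set.ofList S          -- the set argument's distinct elements
  let l : Int := T.length
  !((PySem.List.pyRange 2 (PySem.Int.floordiv l 2 + 1) 1).any fun cl =>
      (pyCombinations T cl.toNat).any fun fc =>
        (pyCombinations (PySem.Set.diff T fc) cl.toNat).any fun sc =>
          fc.sum == sc.sum)

-- ===== PORT B =====
-- the inner loop: one pass over this cardinality's combinations with the sums seen so far
def sumScan : List (List Int) → List Int → Bool
  | [], _ => true
  | c :: cs, seen =>
    let s := c.sum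
    if seen.contains s then false
    else sumScan cs (PySem.Set.add seen s)

-- the outer loop over the cardinalities, each with a fresh seen-set
def sizeScan (elems : List Int) : List Nat → Bool
  | [] => true
  | k :: ks => if sumScan (pyCombinations elems k) [] then sizeScan elems ks else false

def isValidSet_alt (S : List Int) : Bool :=
  let elems := PySem.Set.ofList S      -- list(dict.fromkeys(S)): distinct, in order
  sizeScan elems (List.range' 1 elems.length)   -- for k in range(1, n + 1)

-- ===== PRECONDITION & SPEC =====
def Spec_isValidSet (S : List Int) (out : Bool) : Prop := out = isValidSet_alt S
instance (S : List Int) (out : Bool) : Decidable (Spec_isValidSet S out) := by unfold Spec_isValidSet; infer_instance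

-- ===== CLAIM (what is proved, stated in full; the proofs are below) =====
def Claim_equal_isValidSet : Prop := ∀ (S : List Int), Dom_isValidSet S → Spec_isValidSet S (isValidSet S)

-- ===== LEMMAS AND PROOFS =====

-- membership in A's combinations: exactly the length-k sublists
theorem mem_pyCombinations (xs : List Int) (k : Nat) (c : List Int) :
    c ∈ pyCombinations xs k ↔ c.Sublist xs ∧ c.length = k := by
  induction xs generalizing k c with
  | nil =>
    cases k with
    | zero => simp [pyCombinations, List.sublist_nil]
    | succ k =>
      simp only [pyCombinations, List.not_mem_nil, false_iff, not_and]
      intro h; simp [List.sublist_nil.mp h]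
  | cons x rest ih =>
    cases k with
    | zero =>
      simp [pyCombinations, List.length_eq_zero_iff]
      intro h; subst h; exact List.nil_sublist _
    | succ k =>
      simp only [pyCombinations, List.mem_append, List.mem_map, ih]
      constructor
      · rintro (⟨c', ⟨hs, hl⟩, rfl⟩ | ⟨hs, hl⟩)
        · exact ⟨List.cons_sublist_cons.mpr hs, by simp [hl]⟩
        · exact ⟨hs.cons x, hl⟩
      · rintro ⟨hs, hl⟩
        rcases List.sublist_cons_iff.mp hs with h | ⟨r, rfl, hr⟩
        · exact Or.inr ⟨h, hl⟩
        · exact Or.inl ⟨r, ⟨hr, by simpa using hl⟩, rfl⟩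

-- combinations of a duplicate-free list are pairwise distinct
theorem nodup_pyCombinations (xs : List Int) (hnd : xs.Nodup) (k : Nat) :
    (pyCombinations xs k).Nodup := by
  induction xs generalizing k with
  | nil => cases k <;> simp [pyCombinations]
  | cons x rest ih =>
    cases k with
    | zero => simp [pyCombinations]
    | succ k =>
      simp only [List.nodup_cons] at hnd
      show ((pyCombinations rest k).map (fun c => x :: c) ++ pyCombinations rest (k + 1)).Nodup
      rw [List.nodup_append]
      refine ⟨(ih hnd.2 k).map (fun a b e => by injection e), ih hnd.2 (k + 1), ?_⟩
      intro c hc d hd e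
      obtain ⟨c', _, rfl⟩ := List.mem_map.mp hc
      subst e
      have := (mem_pyCombinations rest (k + 1) (x :: c')).mp hd
      exact hnd.1 (this.1.subset List.mem_cons_self)

-- the inner scan succeeds iff this cardinality's sums are pairwise distinct and avoid seen
theorem sumScan_true_iff (combos : List (List Int)) :
    ∀ (seen : List Int),
    sumScan combos seen = true ↔
      (combos.map List.sum).Nodup ∧ ∀ s ∈ combos.map List.sum, s ∉ seen := by
  induction combos with
  | nil => intro seen; simp [sumScan]
  | cons c cs ih =>
    intro seen
    show (if seen.contains c.sum then false
          else sumScan cs (PySem.Set.add seen c.sum)) = true ↔ _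
    by_cases hm : c.sum ∈ seen
    · rw [if_pos (by simpa using hm)]
      simp only [Bool.false_eq_true, false_iff, not_and]
      intro _ hall
      exact absurd hm (hall _ (by simp))
    · rw [if_neg (by simpa using hm),
        show PySem.Set.add seen c.sum = seen ++ [c.sum] from by
          simp only [PySem.Set.add]
          rw [if_neg (by simpa using hm)],
        ih]
      simp only [List.map_cons, List.nodup_cons, List.mem_cons, List.mem_append,
        List.not_mem_nil, or_false]
      constructor
      · rintro ⟨hnd2, hall2⟩
        refine ⟨⟨fun hmem => ?_, hnd2⟩, ?_⟩
        · exact hall2 _ hmem (Or.inr rfl)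
        · rintro k (rfl | hk)
          · exact hm
          · intro hks
            exact hall2 k hk (Or.inl hks)
      · rintro ⟨⟨hnin, hnd2⟩, hall⟩
        refine ⟨hnd2, fun k hk => ?_⟩
        rintro (hks | rfl)
        · exact hall k (Or.inr hk) hks
        · exact hnin hk

-- the outer loop succeeds iff every cardinality's sums are pairwise distinct
theorem sizeScan_true_iff (elems : List Int) (ks : List Nat) :
    sizeScan elems ks = true ↔
      ∀ k ∈ ks, ((pyCombinations elems k).map List.sum).Nodup := by
  induction ks with
  | nil => simp [sizeScan]
  | cons k ks ih =>
    show (if sumScan (pyCombinations elems k) [] then sizeScan elems ks else false) = true ↔ _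
    by_cases h : sumScan (pyCombinations elems k) [] = true
    · rw [if_pos h, ih]
      have := (sumScan_true_iff (pyCombinations elems k) []).mp h
      simp only [List.mem_cons]
      constructor
      · rintro hall a (rfl | ha)
        · exact this.1
        · exact hall a ha
      · intro hall a ha
        exact hall a (Or.inr ha)
    · rw [if_neg h]
      simp only [Bool.false_eq_true, false_iff, not_forall]
      refine ⟨k, by simp, fun hnd => h ?_⟩
      rw [sumScan_true_iff]
      exact ⟨hnd, by simp⟩

-- a sublist of a duplicate-free list is recovered by filtering
theorem filter_mem_of_sublist (S c : List Int) (h : c.Sublist S) (hnd : S.Nodup) :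
    S.filter (fun x => c.contains x) = c := by
  induction h with
  | slnil => rfl
  | @cons l₁ l₂ x h ih =>
    simp only [List.nodup_cons] at hnd
    have hx : x ∉ l₁ := fun hx => hnd.1 (h.subset hx)
    simp only [List.filter_cons, List.contains_eq_mem, hx, decide_false, Bool.false_eq_true,
      if_false]
    simpa [List.contains_eq_mem] using ih hnd.2
  | @cons₂ l₁ l₂ x h ih =>
    simp only [List.nodup_cons] at hnd
    have hcongr : List.filter (fun y => decide (y ∈ x :: l₁)) l₂
        = List.filter (fun y => decide (y ∈ l₁)) l₂ := by
      apply List.filter_congr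
      intro y hy
      have : y ≠ x := fun e => hnd.1 (e ▸ hy)
      simp [this]
    simp only [List.filter_cons, List.contains_eq_mem, List.mem_cons_self, decide_true, if_true]
    rw [hcongr]
    have hx := ih hnd.2
    simp only [List.contains_eq_mem] at hx
    rw [hx]

theorem sublist_eq_of_mem_iff (S A B : List Int) (hA : A.Sublist S) (hB : B.Sublist S)
    (hnd : S.Nodup) (h : ∀ x, x ∈ A ↔ x ∈ B) : A = B := by
  rw [← filter_mem_of_sublist S A hA hnd, ← filter_mem_of_sublist S B hB hnd]
  apply List.filter_congr
  intro y _
  simp [List.contains_eq_mem, h y]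

theorem sum_filter_not_add (l : List Int) (p : Int → Bool) :
    (l.filter p).sum + (l.filter (fun x => !p x)).sum = l.sum := by
  induction l with
  | nil => simp
  | cons x l ih =>
    by_cases hp : p x <;> simp [hp, ← ih] <;> ring

theorem length_filter_not_add (l : List Int) (p : Int → Bool) :
    (l.filter p).length + (l.filter (fun x => !p x)).length = l.length := by
  induction l with
  | nil => simp
  | cons x l ih =>
    by_cases hp : p x <;> simp [hp, ← ih] <;> omega

-- the existence statements the two programs decide
def ExA (T : List Int) : Prop :=
  ∃ cl ∈ PySem.List.pyRange 2 (PySem.Int.floordiv (T.length : Int) 2 + 1) 1,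
    ∃ fc ∈ pyCombinations T cl.toNat,
      ∃ sc ∈ pyCombinations (PySem.Set.diff T fc) cl.toNat, fc.sum = sc.sum

def ExB (T : List Int) : Prop :=
  ∃ k ∈ List.range' 1 T.length, ∃ c1 ∈ pyCombinations T k, ∃ c2 ∈ pyCombinations T k,
    c1 ≠ c2 ∧ c1.sum = c2.sum

-- two distinct equal-size equal-sum subsets reduce, by removing their common part,
-- to a disjoint equal-size equal-sum pair that A's loops enumerate
theorem exA_of_exB (T : List Int) (hnd : T.Nodup) (h : ExB T) : ExA T := by
  obtain ⟨k, hk, c1, hc1, c2, hc2, hABne, hsum⟩ := h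
  rw [mem_pyCombinations] at hc1 hc2
  set A := c1 with hAdef
  set B := c2 with hBdef
  have hA : A.Sublist T := hc1.1
  have hB : B.Sublist T := hc2.1
  have hAnd : A.Nodup := hA.nodup hnd
  have hBnd : B.Nodup := hB.nodup hnd
  have hlen : A.length = B.length := by rw [hc1.2, hc2.2]
  set fc := A.filter (fun x => !(B.contains x)) with hfcdef
  set sc := B.filter (fun x => !(A.contains x)) with hscdef
  -- the shared parts are permutations of each other
  have hperm : (A.filter (fun x => B.contains x)).Perm (B.filter (fun x => A.contains x)) := by
    rw [List.perm_ext_iff_of_nodup (hAnd.filter _) (hBnd.filter _)]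
    intro a
    simp only [List.mem_filter, List.contains_eq_mem, decide_eq_true_eq]
    tauto
  have hlenEq : fc.length = sc.length := by
    have l1 : (A.filter (fun x => B.contains x)).length
        + (A.filter (fun x => !(B.contains x))).length = A.length :=
      length_filter_not_add A _
    have l2 : (B.filter (fun x => A.contains x)).length
        + (B.filter (fun x => !(A.contains x))).length = B.length :=
      length_filter_not_add B _
    have l3 := hperm.length_eq
    rw [hfcdef, hscdef]
    omega
  have hsumEq : fc.sum = sc.sum := by
    have l1 : (A.filter (fun x => B.contains x)).sum
        + (A.filter (fun x => !(B.contains x))).sum = A.sum :=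
      sum_filter_not_add A _
    have l2 : (B.filter (fun x => A.contains x)).sum
        + (B.filter (fun x => !(A.contains x))).sum = B.sum :=
      sum_filter_not_add B _
    have l3 := hperm.sum_eq
    rw [hfcdef, hscdef]
    linarith
  have hfcA : fc.Sublist A := by rw [hfcdef]; exact List.filter_sublist
  have hscB : sc.Sublist B := by rw [hscdef]; exact List.filter_sublist
  have hfcT : fc.Sublist T := hfcA.trans hA
  have hscT : sc.Sublist T := hscB.trans hB
  have hfc_mem : ∀ x ∈ fc, x ∈ A ∧ x ∉ B := by
    intro x hx
    have := List.mem_filter.mp hx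
    exact ⟨this.1, by simpa [List.contains_eq_mem] using this.2⟩
  have hsc_mem : ∀ x ∈ sc, x ∈ B ∧ x ∉ A := by
    intro x hx
    have := List.mem_filter.mp hx
    exact ⟨this.1, by simpa [List.contains_eq_mem] using this.2⟩
  have hfcne : fc ≠ [] := by
    intro e
    apply hABne
    have hsub : ∀ x ∈ A, x ∈ B := by
      intro x hx
      by_contra hxB
      have : x ∈ fc := List.mem_filter.mpr ⟨hx, by simp [List.contains_eq_mem, hxB]⟩
      rw [e] at this
      exact absurd this List.not_mem_nil
    have hsp : A.Subperm B := List.subperm_of_subset hAnd hsub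
    have hp : A.Perm B := hsp.perm_of_length_le (by omega)
    exact sublist_eq_of_mem_iff T A B hA hB hnd (fun x => hp.mem_iff)
  have hk1 : 1 ≤ fc.length := by
    cases hfcl : fc with
    | nil => exact absurd hfcl hfcne
    | cons a l => simp
  have hk2 : 2 ≤ fc.length := by
    by_contra hlt
    have hfl : fc.length = 1 := by omega
    obtain ⟨u, hu⟩ := List.length_eq_one_iff.mp hfl
    obtain ⟨v, hv⟩ := List.length_eq_one_iff.mp (hlenEq ▸ hfl)
    have huv : u = v := by
      have := hsumEq
      rw [hu, hv] at this
      simpa using this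
    have h1 := hfc_mem u (hu ▸ List.mem_cons_self)
    have h2 := hsc_mem v (hv ▸ List.mem_cons_self)
    exact h1.2 (huv ▸ h2.1)
  have hdisj : ∀ x ∈ fc, x ∉ sc := by
    intro x hx hxs
    exact (hsc_mem x hxs).2 (hfc_mem x hx).1
  have h2k : 2 * fc.length ≤ T.length := by
    have hnod : (fc ++ sc).Nodup := by
      rw [List.nodup_append]
      exact ⟨hfcA.nodup hAnd, hscB.nodup hBnd, fun x hx b hb e => hdisj x hx (e ▸ hb)⟩
    have hsub : (fc ++ sc) ⊆ T := by
      intro x hx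
      rcases List.mem_append.mp hx with hx | hx
      · exact hfcT.subset hx
      · exact hscT.subset hx
    have := (List.subperm_of_subset hnod hsub).length_le
    simp only [List.length_append] at this
    omega
  refine ⟨(fc.length : Int), ?_, fc, ?_, sc, ?_, hsumEq⟩
  · rw [PySem.List.mem_pyRange_one]
    constructor
    · exact_mod_cast hk2
    · rw [PySem.Int.floordiv_eq_ediv_of_pos (by norm_num)]
      omega
  · rw [mem_pyCombinations]
    exact ⟨hfcT, by simp⟩
  · rw [mem_pyCombinations]
    refine ⟨?_, by simp [hlenEq]⟩
    show sc.Sublist (T.filter (fun x => !(fc.contains x)))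
    have hself : sc.filter (fun x => !(fc.contains x)) = sc := by
      apply List.filter_eq_self.mpr
      intro x hx
      simp only [List.contains_eq_mem, Bool.not_eq_eq_eq_not, Bool.not_true, decide_eq_false_iff_not]
      intro hxf
      exact hdisj x hxf hx
    have hstep := hscT.filter (fun x => !(fc.contains x))
    rw [hself] at hstep
    exact hstep

-- a disjoint pair found by A is a key collision between two distinct masks
theorem exB_of_exA (T : List Int) (_hnd : T.Nodup) (h : ExA T) : ExB T := by
  obtain ⟨cl, hcl, fc, hfc, sc, hsc, hsum⟩ := h
  rw [PySem.List.mem_pyRange_one] at hcl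
  rw [mem_pyCombinations] at hfc hsc
  obtain ⟨hfcs, hfcl⟩ := hfc
  obtain ⟨hscs, hscl⟩ := hsc
  have hdiff : PySem.Set.diff T fc = T.filter (fun x => !(fc.contains x)) := rfl
  have hscT : sc.Sublist T := (hdiff ▸ hscs).trans List.filter_sublist
  have hk2 : 2 ≤ cl.toNat := by omega
  have hfcne : fc ≠ [] := by
    intro e
    rw [e] at hfcl
    simp at hfcl
    omega
  have hscne : sc ≠ [] := by
    intro e
    rw [e] at hscl
    simp at hscl
    omega
  have hfs : fc ≠ sc := by
    intro e
    obtain ⟨y, hy⟩ := List.exists_mem_of_ne_nil sc hscne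
    have hmem := hdiff ▸ hscs.subset hy
    rw [List.mem_filter] at hmem
    have : y ∉ fc := by simpa [List.contains_eq_mem] using hmem.2
    exact this (e ▸ hy)
  -- the pair's size is between 2 and n//2, so certainly between 1 and n
  have hkn : cl.toNat ≤ T.length := by
    have := hfcs.length_le
    omega
  have hn1 : 1 ≤ T.length := by omega
  refine ⟨cl.toNat, ?_, fc, ?_, sc, ?_, hfs, hsum⟩
  · rw [List.mem_range'_1]; omega
  · rw [mem_pyCombinations]; exact ⟨hfcs, hfcl⟩
  · rw [mem_pyCombinations]; exact ⟨hscT, hscl⟩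

theorem a_true_iff (S : List Int) : isValidSet S = true ↔ ¬ ExA (PySem.Set.ofList S) := by
  show (!((PySem.List.pyRange 2 (PySem.Int.floordiv ((PySem.Set.ofList S).length : Int) 2 + 1) 1).any
      fun cl => (pyCombinations (PySem.Set.ofList S) cl.toNat).any
        fun fc => (pyCombinations (PySem.Set.diff (PySem.Set.ofList S) fc) cl.toNat).any
          fun sc => fc.sum == sc.sum)) = true ↔ _
  rw [Bool.not_eq_eq_eq_not, Bool.not_true, ← Bool.not_eq_true]
  apply not_congr
  simp only [List.any_eq_true, beq_iff_eq, ExA]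

theorem b_true_iff (S : List Int) : isValidSet_alt S = true ↔ ¬ ExB (PySem.Set.ofList S) := by
  have hnd := PySem.Set.nodup_ofList S
  show sizeScan (PySem.Set.ofList S) (List.range' 1 (PySem.Set.ofList S).length) = true ↔ _
  rw [sizeScan_true_iff]
  unfold ExB
  constructor
  · intro hall hex
    obtain ⟨k, hk, c1, h1, c2, h2, hne, he⟩ := hex
    exact hne (List.inj_on_of_nodup_map (hall k hk) h1 h2 he)
  · intro hnex k hk
    have : ((pyCombinations (PySem.Set.ofList S) k).map List.sum).Nodup
        ↔ (pyCombinations (PySem.Set.ofList S) k).Pairwise (fun a b => a.sum ≠ b.sum) := by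
      unfold List.Nodup
      rw [List.pairwise_map]
    rw [this]
    exact List.Pairwise.imp_of_mem
      (fun {a b} ha hb hab => fun he => hnex ⟨k, hk, a, ha, b, hb, hab, he⟩)
      ((nodup_pyCombinations _ hnd k).imp (fun e => e))

-- ===== VERDICT (by name: the statement is the Claim_ definition above) =====
theorem isValidSet_spec : Claim_equal_isValidSet := by
  intro S _
  unfold Spec_isValidSet
  rw [← Bool.coe_iff_coe, a_true_iff, b_true_iff]
  have hnd := PySem.Set.nodup_ofList S
  exact not_congr ⟨exB_of_exA _ hnd, exA_of_exB _ hnd⟩
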